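-- pv_equiv track=rewrite | github.com/Satou-Diop/DEVDATA_P5_Aissatou_DIOP | P5_Python_FAD004/fonction_projet.py | estEntier
-- ===== SOURCE A (Python) =====
-- def estEntier(nombre):
--     for i in nombre:
--         if i==' ':
--             continue
--         if '0'<= i <= '9':
--             continue
--         else :
--             return False
--     return True
-- ===== SOURCE B (Python) =====
-- def estEntier(nombre):
--     return set(nombre) <= set('0123456789 ')
-- ===== Notes on version B (the rewrite author's own statement) =====
-- stated objective: idiomatic
-- what changed: Replaces the char-by-char scan with branches and an early False return by building the set of distinct characters once and doing a single subset test against the fixed allowed set.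
import Mathlib
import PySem

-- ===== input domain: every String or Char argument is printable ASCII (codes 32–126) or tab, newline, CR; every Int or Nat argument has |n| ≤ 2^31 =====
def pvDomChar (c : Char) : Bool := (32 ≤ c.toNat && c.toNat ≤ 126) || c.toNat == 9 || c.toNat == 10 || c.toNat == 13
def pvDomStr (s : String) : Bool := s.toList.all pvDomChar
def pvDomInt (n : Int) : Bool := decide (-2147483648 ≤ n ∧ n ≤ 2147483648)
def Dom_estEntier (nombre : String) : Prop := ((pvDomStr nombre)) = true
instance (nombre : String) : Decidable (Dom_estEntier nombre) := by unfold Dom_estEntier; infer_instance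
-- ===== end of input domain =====

-- B replaces A's char-by-char scan with early exit by a distinct-character set built once
-- and a single subset test against the fixed allowed set (objective: idiomatic).

-- ===== PORT A =====
-- the for-loop with continue/early 'return False'
def estEntierLoop : List Char → Bool
  | [] => true
  | c :: rest =>
      if c = ' ' then estEntierLoop rest
      else if '0' ≤ c ∧ c ≤ '9' then estEntierLoop rest
      else false

def estEntier (nombre : String) : Bool := estEntierLoop nombre.toList

-- ===== PORT B =====
-- set(nombre) <= set('0123456789 ')
def estEntier_alt (nombre : String) : Bool :=
  PySem.Set.issubset (PySem.Set.ofList nombre.toList)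
    (PySem.Set.ofList "0123456789 ".toList)

-- ===== PRECONDITION & SPEC =====
def Spec_estEntier (nombre : String) (out : Bool) : Prop := out = estEntier_alt nombre
instance (nombre : String) (out : Bool) : Decidable (Spec_estEntier nombre out) := by unfold Spec_estEntier; infer_instance

-- ===== CLAIM (what is proved, stated in full; the proofs are below) =====
def Claim_equal_estEntier : Prop := ∀ (nombre : String), Dom_estEntier nombre → Spec_estEntier nombre (estEntier nombre)

-- ===== LEMMAS AND PROOFS =====
theorem char_eq_of_toNat_eq {c d : Char} (h : c.toNat = d.toNat) : c = d :=
  Char.ext (UInt32.toNat_inj.mp h)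

theorem mem_allowed_iff (c : Char) :
    c ∈ "0123456789 ".toList ↔ (c = ' ' ∨ ('0' ≤ c ∧ c ≤ '9')) := by
  have hlist : "0123456789 ".toList = ['0','1','2','3','4','5','6','7','8','9',' '] := by decide
  rw [hlist]
  simp only [List.mem_cons, List.not_mem_nil, or_false]
  constructor
  · rintro (rfl|rfl|rfl|rfl|rfl|rfl|rfl|rfl|rfl|rfl|rfl) <;> decide
  · rintro (rfl | ⟨h1, h2⟩)
    · tauto
    · have l1 : 48 ≤ c.toNat := h1
      have l2 : c.toNat ≤ 57 := h2
      have : c.toNat = 48 ∨ c.toNat = 49 ∨ c.toNat = 50 ∨ c.toNat = 51 ∨ c.toNat = 52 ∨ c.toNat = 53 ∨ c.toNat = 54 ∨ c.toNat = 55 ∨ c.toNat = 56 ∨ c.toNat = 57 := by omega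
      rcases this with h|h|h|h|h|h|h|h|h|h <;>
        [exact Or.inl (char_eq_of_toNat_eq h);
         exact Or.inr (Or.inl (char_eq_of_toNat_eq h));
         exact Or.inr (Or.inr (Or.inl (char_eq_of_toNat_eq h)));
         exact Or.inr (Or.inr (Or.inr (Or.inl (char_eq_of_toNat_eq h))));
         exact Or.inr (Or.inr (Or.inr (Or.inr (Or.inl (char_eq_of_toNat_eq h)))));
         exact Or.inr (Or.inr (Or.inr (Or.inr (Or.inr (Or.inl (char_eq_of_toNat_eq h))))));
         exact Or.inr (Or.inr (Or.inr (Or.inr (Or.inr (Or.inr (Or.inl (char_eq_of_toNat_eq h)))))));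
         exact Or.inr (Or.inr (Or.inr (Or.inr (Or.inr (Or.inr (Or.inr (Or.inl (char_eq_of_toNat_eq h))))))));
         exact Or.inr (Or.inr (Or.inr (Or.inr (Or.inr (Or.inr (Or.inr (Or.inr (Or.inl (char_eq_of_toNat_eq h)))))))));
         exact Or.inr (Or.inr (Or.inr (Or.inr (Or.inr (Or.inr (Or.inr (Or.inr (Or.inr (Or.inl (char_eq_of_toNat_eq h))))))))))]

theorem loop_eq_all (l : List Char) :
    estEntierLoop l = l.all (fun c => decide (c = ' ' ∨ ('0' ≤ c ∧ c ≤ '9'))) := by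
  induction l with
  | nil => rfl
  | cons c rest ih =>
      simp only [estEntierLoop, List.all_cons]
      by_cases h1 : c = ' '
      · simp [h1, ih]
      · by_cases h2 : '0' ≤ c ∧ c ≤ '9'
        · simp [h1, h2, ih]
        · simp [h1, h2]

-- ===== VERDICT (by name: the statement is the Claim_ definition above) =====
theorem estEntier_spec : Claim_equal_estEntier := by
  intro nombre _
  unfold Spec_estEntier estEntier estEntier_alt
  rw [loop_eq_all]
  rw [Bool.eq_iff_iff, List.all_eq_true, PySem.Set.issubset_iff]
  constructor
  · intro hall x hx
    have hx' := (PySem.Set.mem_ofList _ _).mp hx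
    have := hall x hx'
    exact (PySem.Set.mem_ofList _ _).mpr ((mem_allowed_iff x).mpr (by simpa using this))
  · intro hall x hx
    have := hall x ((PySem.Set.mem_ofList _ _).mpr hx)
    simpa using (mem_allowed_iff x).mp ((PySem.Set.mem_ofList _ _).mp this)
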